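-- pv_equiv track=rewrite | github.com/cehendrie/fight-time | fighttime/roleplayer.py | calculate_hitpoints_zac_style
-- ===== SOURCE A (Python) =====
-- def calculate_hitpoints_zac_style(battlefield):
--     damage = 0
--     health = 1
--     first_negative = True
--     for points in battlefield:
--         damage += points
--         if damage < 0:
--             health = abs(damage) + 1
--         else:
--             health = 1
--
--     return health
-- ===== SOURCE B (Python) =====
-- def calculate_hitpoints_zac_style(battlefield):
--     def tot(seg):
--         # pairwise (divide-and-conquer) summation of the segment
--         if len(seg) <= 1:
--             return seg[0] if seg else 0
--         mid = len(seg) // 2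
--         return tot(seg[:mid]) + tot(seg[mid:])
--
--     t = tot(battlefield)
--     return max(1, 1 - t)
-- ===== Notes on version B (the rewrite author's own statement) =====
-- stated objective: alternative
-- what changed: B replaces A's left-to-right loop with per-step branching and running health state by a divide-and-conquer (pairwise) summation of the battlefield, then expresses the result as the single branch-free formula max(1, 1 - total).
import Mathlib
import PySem

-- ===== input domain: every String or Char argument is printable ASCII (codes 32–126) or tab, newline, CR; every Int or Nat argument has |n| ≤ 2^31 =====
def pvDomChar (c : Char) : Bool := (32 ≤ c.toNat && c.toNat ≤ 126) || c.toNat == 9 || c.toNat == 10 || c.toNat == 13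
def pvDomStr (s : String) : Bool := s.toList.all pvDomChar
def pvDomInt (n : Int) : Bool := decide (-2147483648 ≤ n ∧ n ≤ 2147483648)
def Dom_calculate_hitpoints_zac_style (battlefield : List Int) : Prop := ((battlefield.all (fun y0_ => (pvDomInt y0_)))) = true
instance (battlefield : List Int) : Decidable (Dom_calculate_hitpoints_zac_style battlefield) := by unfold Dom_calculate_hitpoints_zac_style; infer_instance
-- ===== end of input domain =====

-- ===== PORT A =====
def calculate_hitpoints_zac_style (battlefield : List Int) : Int :=
  -- damage = 0; health = 1; for points in battlefield: damage += points; branch on damage < 0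
  (battlefield.foldl
    (fun (st : Int × Int) points =>
      let damage := st.1 + points
      if damage < 0 then (damage, |damage| + 1) else (damage, 1))
    (0, 1)).2

-- ===== PORT B =====
-- B sums the battlefield by divide-and-conquer on halves, then applies max(1, 1 - total).
-- tot(seg): seg[:mid] / seg[mid:] with 0 ≤ mid ≤ len(seg) are exactly take/drop;
-- len(seg)//2 on a nonnegative length is exactly Nat division; seg[0] if seg else 0 is headD 0.
def pvTot (seg : List Int) : Int :=
  if seg.length ≤ 1 then seg.headD 0
  else
    let mid := seg.length / 2
    pvTot (seg.take mid) + pvTot (seg.drop mid)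
termination_by seg.length
decreasing_by
  · simp only [List.length_take]; omega
  · simp only [List.length_drop]; omega

def calculate_hitpoints_zac_style_alt (battlefield : List Int) : Int :=
  let t := pvTot battlefield
  max 1 (1 - t)

-- ===== PRECONDITION & SPEC =====
def Spec_calculate_hitpoints_zac_style (battlefield : List Int) (out : Int) : Prop := out = calculate_hitpoints_zac_style_alt battlefield
instance (battlefield : List Int) (out : Int) : Decidable (Spec_calculate_hitpoints_zac_style battlefield out) := by unfold Spec_calculate_hitpoints_zac_style; infer_instance

-- ===== CLAIM (what is proved, stated in full; the proofs are below) =====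
def Claim_equal_calculate_hitpoints_zac_style : Prop := ∀ (battlefield : List Int), Dom_calculate_hitpoints_zac_style battlefield → Spec_calculate_hitpoints_zac_style battlefield (calculate_hitpoints_zac_style battlefield)

-- ===== LEMMAS AND PROOFS =====
-- Pairwise summation computes the plain list sum.
theorem pvTot_eq_sum (seg : List Int) : pvTot seg = seg.sum := by
  rw [pvTot]
  split
  · next h =>
    match seg, h with
    | [], _ => simp
    | [a], _ => simp
  · next h =>
    have h1 := pvTot_eq_sum (seg.take (seg.length / 2))
    have h2 := pvTot_eq_sum (seg.drop (seg.length / 2))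
    simp only []
    rw [h1, h2, ← List.sum_append, List.take_append_drop]
termination_by seg.length
decreasing_by
  · simp only [List.length_take]; omega
  · simp only [List.length_drop]; omega

-- A's fold invariant: the state is (d + sum l, hitpoints for cumulative damage d + sum l).
theorem pv_fold_inv (l : List Int) (d : Int) :
    (l.foldl
      (fun (st : Int × Int) points =>
        let damage := st.1 + points
        if damage < 0 then (damage, |damage| + 1) else (damage, 1))
      (d, if d < 0 then |d| + 1 else 1))
    = (d + l.sum, if d + l.sum < 0 then |d + l.sum| + 1 else 1) := by
  induction l generalizing d with
  | nil => simp
  | cons x xs ih =>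
    simp only [List.foldl_cons, List.sum_cons]
    by_cases h : d + x < 0
    all_goals {
      have h2 := ih (d + x)
      simp only [h, if_true, if_false] at h2 ⊢
      rw [h2]
      ring_nf }

-- ===== VERDICT (by name: the statement is the Claim_ definition above) =====
theorem calculate_hitpoints_zac_style_spec : Claim_equal_calculate_hitpoints_zac_style := by
  intro battlefield _
  unfold Spec_calculate_hitpoints_zac_style calculate_hitpoints_zac_style calculate_hitpoints_zac_style_alt
  have h := pv_fold_inv battlefield 0
  simp only [show ((0:Int) < 0) = False by simp, if_false] at h
  rw [h, pvTot_eq_sum]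
  rcases lt_or_ge (battlefield.sum) 0 with hs | hs
  · simp only [zero_add, hs, if_true]
    rw [abs_of_neg hs]; omega
  · simp only [zero_add]
    rw [if_neg (by omega)]; omega
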